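-- pv_equiv track=rewrite | github.com/rashiraffi/Tutorials | Hackerrank/CV/g.py | count
-- ===== SOURCE A (Python) =====
-- def count(s):
--     wres=0
--     br=0
--     w=1
--     b=1
--     for c in s:
--         if(c=="w"):
--             if(b==1):
--                 b=0
--                 w=1
--             else:
--                 wres+=1
--                 b=1
--                 w=0
--         elif(c=="b"):
--             if(w==1):
--                 b=1
--                 w=0
--             else:
--                 wres+=1
--                 b=0
--                 w=1
--     w=1
--     b=1
--     for c in s:
--         if(c=="b"):
--             if(w==1):
--                 b=1
--                 w=0
--             else:
--                 br+=1
--                 b=0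
--                 w=1
--         elif(c=="w"):
--             if(b==1):
--                 b=0
--                 w=1
--             else:
--                 br+=1
--                 b=1
--                 w=0
--     if(wres<=br):
--         return wres
--     else:
--         return br
-- ===== SOURCE B (Python) =====
-- def count(s):
--     t = [c for c in s if c in ('w', 'b')]
--     if not t:
--         return 0
--     other = 'b' if t[0] == 'w' else 'w'
--     return sum(1 for i, c in enumerate(t) if c != (t[0] if i % 2 == 0 else other))
-- ===== Notes on version B (the rewrite author's own statement) =====
-- stated objective: simpler
-- what changed: Replaced A's two identical incremental state machines plus a final min by a single filter of the color characters followed by an indexed comparison against the alternating pattern anchored at the first color character.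
import Mathlib
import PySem

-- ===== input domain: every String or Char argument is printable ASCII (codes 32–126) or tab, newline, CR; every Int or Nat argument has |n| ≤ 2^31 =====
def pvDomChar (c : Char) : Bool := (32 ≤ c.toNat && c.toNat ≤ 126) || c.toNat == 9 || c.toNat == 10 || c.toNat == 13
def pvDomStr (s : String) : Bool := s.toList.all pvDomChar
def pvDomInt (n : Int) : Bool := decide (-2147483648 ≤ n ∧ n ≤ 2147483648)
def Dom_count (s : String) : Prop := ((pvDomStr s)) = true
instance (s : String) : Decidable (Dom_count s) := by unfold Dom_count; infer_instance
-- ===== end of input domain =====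

-- B replaces A's two identical greedy state machines with a single filter of the color
-- characters and an indexed comparison against the anchored alternating pattern (simpler).

-- ===== PORT A =====
-- state = (wres, b, w); first loop of A
def countLoopW (st : Int × Int × Int) (c : Char) : Int × Int × Int :=
  let (wres, b, w) := st
  if c = 'w' then
    if b = 1 then (wres, 0, 1) else (wres + 1, 1, 0)
  else if c = 'b' then
    if w = 1 then (wres, 1, 0) else (wres + 1, 0, 1)
  else (wres, b, w)

-- state = (br, b, w); second loop of A ('b' branch tested first, as in the source)
def countLoopB (st : Int × Int × Int) (c : Char) : Int × Int × Int :=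
  let (br, b, w) := st
  if c = 'b' then
    if w = 1 then (br, 1, 0) else (br + 1, 0, 1)
  else if c = 'w' then
    if b = 1 then (br, 0, 1) else (br + 1, 1, 0)
  else (br, b, w)

def count (s : String) : Int :=
  let r1 := s.toList.foldl countLoopW (0, 1, 1)
  let r2 := s.toList.foldl countLoopB (0, 1, 1)
  let wres := r1.1
  let br := r2.1
  if wres ≤ br then wres else br

-- ===== PORT B =====
def count_alt (s : String) : Int :=
  let t := s.toList.filter (fun c => c = 'w' ∨ c = 'b')
  match t with
  | [] => 0
  | c0 :: _ =>
    let other := if c0 = 'w' then 'b' else 'w'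
    (PySem.List.enumerate t 0).foldl
      (fun acc p => if p.2 ≠ (if PySem.Int.mod p.1 2 = 0 then c0 else other) then acc + 1 else acc) 0

-- ===== PRECONDITION & SPEC =====
def Spec_count (s : String) (out : Int) : Prop := out = count_alt s
instance (s : String) (out : Int) : Decidable (Spec_count s out) := by unfold Spec_count; infer_instance

-- ===== CLAIM (what is proved, stated in full; the proofs are below) =====
def Claim_equal_count : Prop := ∀ (s : String), Dom_count s → Spec_count s (count s)

-- ===== LEMMAS AND PROOFS =====

-- the opposite color
def pvFlip (c : Char) : Char := if c = 'w' then 'b' else 'w'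

-- greedy mismatch count against the alternating pattern expecting e first
def pvMis (e : Char) : List Char → Int
  | [] => 0
  | c :: t => (if c = e then 0 else 1) + pvMis (pvFlip e) t

-- non-color chars leave the state unchanged
theorem countLoopW_other (st : Int × Int × Int) (c : Char) (hw : c ≠ 'w') (hb : c ≠ 'b') :
    countLoopW st c = st := by
  obtain ⟨r, b, w⟩ := st
  simp [countLoopW, hw, hb]

-- the second loop body computes the same step function as the first
theorem countLoopB_eq : countLoopB = countLoopW := by
  funext st c
  obtain ⟨r, b, w⟩ := st
  by_cases hw : c = 'w' <;> by_cases hb : c = 'b' <;>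
    simp_all [countLoopB, countLoopW]

-- folding A's loop over a list equals folding it over the color filter
theorem foldW_filter (l : List Char) (st : Int × Int × Int) :
    l.foldl countLoopW st
      = (l.filter (fun c => decide (c = 'w' ∨ c = 'b'))).foldl countLoopW st := by
  induction l generalizing st with
  | nil => rfl
  | cons c t ih =>
    by_cases hw : c = 'w'
    · simp [hw, ih]
    · by_cases hb : c = 'b'
      · simp [hb, ih]
      · simp [hw, hb, countLoopW_other st c hw hb, ih]


-- on all-color lists, A's loop counts greedy mismatches (pvMis) from either anchored state
theorem foldW_run (l : List Char) (h : ∀ c ∈ l, c = 'w' ∨ c = 'b') :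
    (∀ r : Int, (l.foldl countLoopW (r, 0, 1)).1 = r + pvMis 'b' l) ∧
    (∀ r : Int, (l.foldl countLoopW (r, 1, 0)).1 = r + pvMis 'w' l) := by
  induction l with
  | nil => simp [pvMis]
  | cons c t ih =>
    have hc := h c (by simp)
    have ht := ih (fun x hx => h x (List.mem_cons_of_mem _ hx))
    rcases hc with hc | hc <;> subst hc <;>
      refine ⟨fun r => ?_, fun r => ?_⟩ <;>
      simp [List.foldl_cons, countLoopW, pvMis, pvFlip, ht.1, ht.2] <;> ring

-- B's enumerate-fold computes pvMis of the index-parity-anchored pattern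
theorem foldEnum_run (c0 : Char) (h0 : c0 = 'w' ∨ c0 = 'b') (t : List Char) :
    ∀ (n : Int) (acc : Int),
      (PySem.List.enumerate t n).foldl
        (fun acc p => if p.2 ≠ (if PySem.Int.mod p.1 2 = 0 then c0 else pvFlip c0) then acc + 1 else acc) acc
      = acc + pvMis (if PySem.Int.mod n 2 = 0 then c0 else pvFlip c0) t := by
  induction t with
  | nil => intro n acc; simp [PySem.List.enumerate_nil, pvMis]
  | cons c t ih =>
    intro n acc
    have hmod : PySem.Int.mod n 2 = n % 2 := PySem.Int.mod_eq_emod_of_pos (by omega)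
    have hmod1 : PySem.Int.mod (n + 1) 2 = (n + 1) % 2 := PySem.Int.mod_eq_emod_of_pos (by omega)
    have hflip : pvFlip (pvFlip c0) = c0 := by rcases h0 with h | h <;> subst h <;> decide
    have hpar : (if PySem.Int.mod (n + 1) 2 = 0 then c0 else pvFlip c0)
        = pvFlip (if PySem.Int.mod n 2 = 0 then c0 else pvFlip c0) := by
      rw [hmod, hmod1]
      by_cases hn : n % 2 = 0
      · have : (n + 1) % 2 = 1 := by omega
        simp [hn, this]
      · have : (n + 1) % 2 = 0 := by omega
        simp [hn, this, hflip]
    rw [PySem.List.enumerate_cons, List.foldl_cons, ih (n + 1), hpar]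
    simp only [pvMis]
    split_ifs <;> first | tauto | ring

theorem count_spec : Claim_equal_count := by
  intro s _
  unfold Spec_count count count_alt
  rw [countLoopB_eq, foldW_filter s.toList (0, 1, 1)]
  rcases hF : s.toList.filter (fun c => decide (c = 'w' ∨ c = 'b')) with _ | ⟨c0, rest⟩
  · simp
  · have hmem : ∀ c ∈ c0 :: rest, c = 'w' ∨ c = 'b' := by
      intro c hc
      have := List.of_mem_filter (hF ▸ hc)
      simpa using this
    have h0 : c0 = 'w' ∨ c0 = 'b' := hmem c0 (by simp)
    have hrest : ∀ c ∈ rest, c = 'w' ∨ c = 'b' := fun c hc => hmem c (List.mem_cons_of_mem _ hc)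
    have hstart : ((c0 :: rest).foldl countLoopW (0, 1, 1)).1 = pvMis (pvFlip c0) rest := by
      rcases h0 with h | h <;> subst h <;>
        simp [List.foldl_cons, countLoopW, (foldW_run rest hrest).1, (foldW_run rest hrest).2, pvFlip]
    simp only [if_pos (le_refl _), hstart,
      show (if c0 = 'w' then 'b' else 'w') = pvFlip c0 from rfl]
    rw [foldEnum_run c0 h0 (c0 :: rest) 0 0]
    simp [pvMis]
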